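-- pv_equiv track=rewrite | github.com/u5n/u5n.github.io | algods/py to cpp/stringUtil.py | substrFirstPar
-- ===== SOURCE A (Python) =====
-- def substrFirstPar(s, sta=0):
--     """ substr insider first parenthesis """
--     l = 0
--     ret = []
--     expected = None
--     for c in s[sta:]:
--         if c=='(' and expected!=']':
--             expected = ')'
--             l+=1
--         elif c=='[' and expected!=')':
--             expected = ']'
--             l+=1
--         elif c==expected:
--             l-=1
--             if l==0: break
--         if l>0:
--             ret.append(c)
--     return "".join(ret[1:])
-- ===== SOURCE B (Python) =====
-- def substrFirstPar(s, sta=0):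
--     """substr inside first parenthesis -- two phases over one shared iterator"""
--     it = iter(s[sta:])
--     cl = None
--     for c in it:
--         if c == '(':
--             op, cl = '(', ')'
--             break
--         if c == '[':
--             op, cl = '[', ']'
--             break
--     if cl is None:
--         return ""
--     depth = 1
--     out = []
--     for c in it:
--         if c == op:
--             depth += 1
--         elif c == cl:
--             depth -= 1
--             if depth == 0:
--                 break
--         out.append(c)
--     return "".join(out)
-- ===== Notes on version B (the rewrite author's own statement) =====
-- stated objective: simpler
-- what changed: A is a single scan threading a depth counter, an expected-closer state variable and an accumulator whose first element is later sliced off; B is two phases over one shared iterator: find the first opener (empty result if none), then a plain depth count starting at 1 that collects characters until the matching closer.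
import Mathlib
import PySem

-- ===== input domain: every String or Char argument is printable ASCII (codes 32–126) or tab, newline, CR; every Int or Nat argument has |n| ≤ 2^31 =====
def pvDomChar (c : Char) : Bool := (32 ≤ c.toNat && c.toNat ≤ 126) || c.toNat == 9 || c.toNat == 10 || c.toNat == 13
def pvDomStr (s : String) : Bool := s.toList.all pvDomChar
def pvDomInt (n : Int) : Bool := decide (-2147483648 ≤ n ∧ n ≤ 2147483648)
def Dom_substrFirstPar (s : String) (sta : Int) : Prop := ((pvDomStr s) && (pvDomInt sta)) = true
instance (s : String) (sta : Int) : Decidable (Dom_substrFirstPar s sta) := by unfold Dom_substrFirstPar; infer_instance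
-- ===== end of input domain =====

-- B splits A's single stateful scan into two phases (find the first opener, then a depth
-- count from 1 over the remaining characters) — objective: simpler decomposition, same cost.

-- ===== PORT A =====
-- A's single loop: state l (depth), ret (accumulated chars), expected (close char or None);
-- appends c whenever l>0 after the branch, breaks when l hits 0, returns ret[1:].
def pvALoop : List Char → Int → List Char → Option Char → List Char
  | [], _, ret, _ => ret
  | c :: cs, l, ret, expected =>
    if c = '(' ∧ expected ≠ some ']' then
      pvALoop cs (l + 1) (if l + 1 > 0 then ret ++ [c] else ret) (some ')')
    else if c = '[' ∧ expected ≠ some ')' then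
      pvALoop cs (l + 1) (if l + 1 > 0 then ret ++ [c] else ret) (some ']')
    else if some c = expected then
      if l - 1 = 0 then ret
      else pvALoop cs (l - 1) (if l - 1 > 0 then ret ++ [c] else ret) expected
    else
      pvALoop cs l (if l > 0 then ret ++ [c] else ret) expected

def substrFirstPar (s : String) (sta : Int) : String :=
  String.ofList ((pvALoop (PySem.List.slice s.toList (some sta) none) 0 [] none).drop 1)

-- ===== PORT B =====
-- phase 1: consume the iterator until the first '(' or '[', reporting opener/closer and the rest
def pvBFind : List Char → Option (Char × Char × List Char)
  | [] => none
  | c :: cs =>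
    if c = '(' then some ('(', ')', cs)
    else if c = '[' then some ('[', ']', cs)
    else pvBFind cs

-- phase 2: depth count starting at 1; break (return out) when depth reaches 0
def pvBLoop (op cl : Char) : List Char → Int → List Char → List Char
  | [], _, out => out
  | c :: cs, depth, out =>
    if c = op then pvBLoop op cl cs (depth + 1) (out ++ [c])
    else if c = cl then
      if depth - 1 = 0 then out
      else pvBLoop op cl cs (depth - 1) (out ++ [c])
    else pvBLoop op cl cs depth (out ++ [c])

def substrFirstPar_alt (s : String) (sta : Int) : String :=
  match pvBFind (PySem.List.slice s.toList (some sta) none) with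
  | none => ""
  | some (op, cl, rest) => String.ofList (pvBLoop op cl rest 1 [])

-- ===== PRECONDITION & SPEC =====
def Spec_substrFirstPar (s : String) (sta : Int) (out : String) : Prop := out = substrFirstPar_alt s sta
instance (s : String) (sta : Int) (out : String) : Decidable (Spec_substrFirstPar s sta out) := by unfold Spec_substrFirstPar; infer_instance

-- ===== CLAIM (what is proved, stated in full; the proofs are below) =====
def Claim_equal_substrFirstPar : Prop := ∀ (s : String) (sta : Int), Dom_substrFirstPar s sta → Spec_substrFirstPar s sta (substrFirstPar s sta)

-- ===== LEMMAS AND PROOFS =====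

-- pvBLoop is an accumulator homomorphism
theorem pvBLoop_acc (op cl : Char) (cs : List Char) : ∀ (d : Int) (a out : List Char),
    pvBLoop op cl cs d (a ++ out) = a ++ pvBLoop op cl cs d out := by
  induction cs with
  | nil => intro d a out; simp [pvBLoop]
  | cons c cs ih =>
    intro d a out
    simp only [pvBLoop]
    by_cases h1 : c = op
    · rw [if_pos h1, if_pos h1, List.append_assoc]
      exact ih (d + 1) a (out ++ [c])
    · rw [if_neg h1, if_neg h1]
      by_cases h2 : c = cl
      · rw [if_pos h2, if_pos h2]
        by_cases h3 : d - 1 = 0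
        · rw [if_pos h3, if_pos h3]
        · rw [if_neg h3, if_neg h3, List.append_assoc]
          exact ih (d - 1) a (out ++ [c])
      · rw [if_neg h2, if_neg h2, List.append_assoc]
        exact ih d a (out ++ [c])

-- once '(' has been seen, A's scan with expected = ')' is B's depth count
theorem pvInner_paren (cs : List Char) : ∀ (l : Int) (ret : List Char), 1 ≤ l →
    pvALoop cs l ret (some ')') = pvBLoop '(' ')' cs l ret := by
  induction cs with
  | nil => intro l ret _; simp [pvALoop, pvBLoop]
  | cons c cs ih =>
    intro l ret hl
    simp only [pvALoop, pvBLoop]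
    rw [if_neg (show ¬(c = '[' ∧ some ')' ≠ some ')') from fun h => h.2 rfl)]
    by_cases h1 : c = '('
    · rw [if_pos ⟨h1, by decide⟩, if_pos h1,
        if_pos (show l + 1 > 0 by omega)]
      exact ih (l + 1) (ret ++ [c]) (by omega)
    · rw [if_neg (fun h => h1 h.1), if_neg h1]
      by_cases h2 : c = ')'
      · rw [if_pos (congrArg some h2), if_pos h2]
        by_cases h3 : l - 1 = 0
        · rw [if_pos h3, if_pos h3]
        · rw [if_neg h3, if_neg h3, if_pos (show l - 1 > 0 by omega)]
          exact ih (l - 1) (ret ++ [c]) (by omega)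
      · rw [if_neg (fun h => h2 (Option.some.inj h)), if_neg h2,
          if_pos (show l > 0 by omega)]
        exact ih l (ret ++ [c]) hl

-- once '[' has been seen, A's scan with expected = ']' is B's depth count
theorem pvInner_brack (cs : List Char) : ∀ (l : Int) (ret : List Char), 1 ≤ l →
    pvALoop cs l ret (some ']') = pvBLoop '[' ']' cs l ret := by
  induction cs with
  | nil => intro l ret _; simp [pvALoop, pvBLoop]
  | cons c cs ih =>
    intro l ret hl
    simp only [pvALoop, pvBLoop]
    rw [if_neg (show ¬(c = '(' ∧ some ']' ≠ some ']') from fun h => h.2 rfl)]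
    by_cases h1 : c = '['
    · rw [if_pos ⟨h1, by decide⟩, if_pos h1,
        if_pos (show l + 1 > 0 by omega)]
      exact ih (l + 1) (ret ++ [c]) (by omega)
    · rw [if_neg (fun h => h1 h.1), if_neg h1]
      by_cases h2 : c = ']'
      · rw [if_pos (congrArg some h2), if_pos h2]
        by_cases h3 : l - 1 = 0
        · rw [if_pos h3, if_pos h3]
        · rw [if_neg h3, if_neg h3, if_pos (show l - 1 > 0 by omega)]
          exact ih (l - 1) (ret ++ [c]) (by omega)
      · rw [if_neg (fun h => h2 (Option.some.inj h)), if_neg h2,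
          if_pos (show l > 0 by omega)]
        exact ih l (ret ++ [c]) hl

-- A's whole scan (with its ret[1:]) equals B's find-then-count decomposition
theorem pvOuter (cs : List Char) :
    (pvALoop cs 0 [] none).drop 1 =
      (match pvBFind cs with
       | none => []
       | some (op, cl, rest) => pvBLoop op cl rest 1 []) := by
  induction cs with
  | nil => simp [pvALoop, pvBFind]
  | cons c cs ih =>
    by_cases h1 : c = '('
    · have h := pvInner_paren cs 1 ['('] (by omega)
      have hacc := pvBLoop_acc '(' ')' cs 1 ['('] []
      simp only [List.append_nil] at hacc
      simp [pvALoop, pvBFind, h1, h, hacc]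
    · by_cases h2 : c = '['
      · have h := pvInner_brack cs 1 ['['] (by omega)
        have hacc := pvBLoop_acc '[' ']' cs 1 ['['] []
        simp only [List.append_nil] at hacc
        simp [pvALoop, pvBFind, h2, h, hacc]
      · simp only [pvALoop, pvBFind]
        rw [if_neg (fun h => h1 h.1), if_neg (fun h => h2 h.1),
          if_neg (show ¬(some c = (none : Option Char)) from by simp),
          if_neg (show ¬((0:Int) > 0) by omega), if_neg h1, if_neg h2]
        exact ih

-- ===== VERDICT (by name: the statement is the Claim_ definition above) =====
theorem substrFirstPar_spec : Claim_equal_substrFirstPar := by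
  intro s sta _
  unfold Spec_substrFirstPar substrFirstPar substrFirstPar_alt
  rw [pvOuter (PySem.List.slice s.toList (some sta) none)]
  cases pvBFind (PySem.List.slice s.toList (some sta) none) with
  | none => rfl
  | some x => rfl
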